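-- pv_equiv track=rewrite | github.com/c788630/Numclass | src/numclass/classifiers/named_sequences.py | _k2k_equals
-- ===== SOURCE A (Python) =====
-- def _k2k_equals(m: int) -> int | None:
--     """
--     Find k>=1 with k*2^k == m, or return None.
--     Uses monotone binary search with hi := bit_length(m).
--     """
--     if m <= 0:
--         return None
--     lo, hi = 1, m.bit_length()  # k < log2(m) + 1 always holds if m=k*2^k
--     while lo <= hi:
--         mid = (lo + hi) // 2
--         val = mid << mid  # mid * 2^mid
--         if val == m:
--             return mid
--         if val < m:
--             lo = mid + 1
--         else:
--             hi = mid - 1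
--     return None
-- ===== SOURCE B (Python) =====
-- def _k2k_equals(m: int) -> int | None:
--     """Find k>=1 with k*2^k == m, or None: linear scan of the strictly
--     increasing sequence k*2^k, breaking as soon as it overshoots m."""
--     if m <= 0:
--         return None
--     for k in range(1, m.bit_length() + 1):
--         val = k << k
--         if val == m:
--             return k
--         if val > m:
--             break
--     return None
-- ===== Notes on version B (the rewrite author's own statement) =====
-- stated objective: simpler
-- what changed: Replaces the binary search over [1, bit_length(m)] with a direct linear scan that increments k and breaks as soon as k*2^k overshoots m, maintaining no search interval.
import Mathlib
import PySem

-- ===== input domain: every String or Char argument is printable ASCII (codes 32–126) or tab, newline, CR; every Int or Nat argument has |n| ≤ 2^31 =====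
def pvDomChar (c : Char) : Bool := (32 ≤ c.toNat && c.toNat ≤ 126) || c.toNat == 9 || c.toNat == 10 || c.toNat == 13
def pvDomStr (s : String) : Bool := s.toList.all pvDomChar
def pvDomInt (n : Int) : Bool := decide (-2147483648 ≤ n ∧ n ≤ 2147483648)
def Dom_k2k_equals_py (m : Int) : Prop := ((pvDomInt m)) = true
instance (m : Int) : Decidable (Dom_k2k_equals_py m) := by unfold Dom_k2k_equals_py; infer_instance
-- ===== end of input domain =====

-- B replaces A's binary search by a linear scan of the increasing sequence k*2^k
-- that breaks on the first overshoot (objective: simpler).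

-- ===== PORT A =====
-- the while-loop of A, state (lo, hi); terminates because hi - lo shrinks
def k2kSearch (m lo hi : Int) : Option Int :=
  if h : lo ≤ hi then
    let mid := PySem.Int.floordiv (lo + hi) 2
    -- mid << mid : here 1 ≤ lo ≤ mid, so the shift amount is mid.toNat
    let val := mid <<< mid.toNat
    if val = m then some mid
    else if val < m then k2kSearch m (mid + 1) hi
    else k2kSearch m lo (mid - 1)
  else none
termination_by (hi + 1 - lo).toNat
decreasing_by
  · have := PySem.Int.floordiv_two_mid_bounds h; omega
  · have := PySem.Int.floordiv_two_mid_bounds h; omega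

def k2k_equals_py (m : Int) : Option Int :=
  if m ≤ 0 then none
  else k2kSearch m 1 (PySem.Int.bitLength m)

-- ===== PORT B =====
-- the for-loop of B: k runs over range(1, bound), returns on hit, breaks on overshoot
def k2kScan (m k bound : Int) : Option Int :=
  if h : k < bound then
    let val := k <<< k.toNat
    if val = m then some k
    else if val > m then none
    else k2kScan m (k + 1) bound
  else none
termination_by (bound - k).toNat

def k2k_equals_py_alt (m : Int) : Option Int :=
  if m ≤ 0 then none
  else k2kScan m 1 (PySem.Int.bitLength m + 1)

-- ===== PRECONDITION & SPEC =====
def Spec_k2k_equals_py (m : Int) (out : Option Int) : Prop := out = k2k_equals_py_alt m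
instance (m : Int) (out : Option Int) : Decidable (Spec_k2k_equals_py m out) := by unfold Spec_k2k_equals_py; infer_instance

-- ===== CLAIM (what is proved, stated in full; the proofs are below) =====
def Claim_equal_k2k_equals_py : Prop := ∀ (m : Int), Dom_k2k_equals_py m → Spec_k2k_equals_py m (k2k_equals_py m)

-- ===== LEMMAS AND PROOFS =====

theorem k2k_shift (k : Int) : k <<< k.toNat = k * 2 ^ k.toNat := by
  simp [Int.shiftLeft_eq]

-- strict monotonicity of k ↦ k * 2^k on k ≥ 1
theorem k2k_mono {a b : Int} (ha : 1 ≤ a) (hab : a < b) :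
    a * 2 ^ a.toNat < b * 2 ^ b.toNat := by
  have h1 : a * 2 ^ a.toNat < b * 2 ^ a.toNat := by
    have : (0:Int) < 2 ^ a.toNat := by positivity
    exact mul_lt_mul_of_pos_right hab this
  have h2 : b * 2 ^ a.toNat ≤ b * 2 ^ b.toNat := by
    have hb : (0:Int) ≤ b := by omega
    have : (2:Int) ^ a.toNat ≤ 2 ^ b.toNat := by
      apply pow_le_pow_right₀ (by norm_num)
      omega
    exact mul_le_mul_of_nonneg_left this hb
  omega

theorem k2k_inj {a b : Int} (ha : 1 ≤ a) (hb : 1 ≤ b)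
    (h : a * 2 ^ a.toNat = b * 2 ^ b.toNat) : a = b := by
  rcases lt_trichotomy a b with hlt | he | hgt
  · exact absurd h (ne_of_lt (k2k_mono ha hlt))
  · exact he
  · exact absurd h.symm (ne_of_lt (k2k_mono hb hgt))

-- A's loop: no solution in [lo, hi] ⇒ none
theorem k2kSearch_none (m lo hi : Int)
    (hno : ∀ k, lo ≤ k → k ≤ hi → k * 2 ^ k.toNat ≠ m) :
    k2kSearch m lo hi = none := by
  fun_induction k2kSearch m lo hi with
  | case1 lo hi h mid val heq =>
      have hb := PySem.Int.floordiv_two_mid_bounds h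
      have : mid * 2 ^ mid.toNat = m := by rw [← k2k_shift]; exact heq
      exact absurd this (hno mid hb.1 hb.2)
  | case2 lo hi h mid val hne hlt ih =>
      have hb := PySem.Int.floordiv_two_mid_bounds h
      exact ih (fun k hk1 hk2 => hno k (by omega) hk2)
  | case3 lo hi h mid val hne hge ih =>
      have hb := PySem.Int.floordiv_two_mid_bounds h
      exact ih (fun k hk1 hk2 => hno k hk1 (by omega))
  | case4 => rfl

-- A's loop: solution k0 in [lo, hi] with 1 ≤ lo ⇒ finds it
theorem k2kSearch_some (m lo hi k0 : Int) (h1 : 1 ≤ lo)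
    (hkl : lo ≤ k0) (hkh : k0 ≤ hi) (hsol : k0 * 2 ^ k0.toNat = m) :
    k2kSearch m lo hi = some k0 := by
  fun_induction k2kSearch m lo hi with
  | case1 lo hi h mid val heq =>
      have hv : mid * 2 ^ mid.toNat = m := by rw [← k2k_shift]; exact heq
      have hb := PySem.Int.floordiv_two_mid_bounds h
      have : mid = k0 := k2k_inj (by omega) (by omega) (hv.trans hsol.symm)
      simp [this]
  | case2 lo hi h mid val hne hlt ih =>
      have hv : val = mid * 2 ^ mid.toNat := (k2k_shift mid).symm ▸ rfl
      have hb := PySem.Int.floordiv_two_mid_bounds h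
      have hmk : mid < k0 := by
        by_contra hc
        rcases lt_or_eq_of_le (le_of_not_gt hc) with hlt2 | he
        · have := k2k_mono (by omega : (1:Int) ≤ k0) hlt2
          omega
        · subst he; omega
      exact ih (by omega) (by omega) hkh
  | case3 lo hi h mid val hne hge ih =>
      have hv : val = mid * 2 ^ mid.toNat := (k2k_shift mid).symm ▸ rfl
      have hb := PySem.Int.floordiv_two_mid_bounds h
      have hmk : k0 < mid := by
        by_contra hc
        rcases lt_or_eq_of_le (le_of_not_gt hc) with hlt2 | he
        · have := k2k_mono (by omega : (1:Int) ≤ mid) hlt2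
          omega
        · rw [he] at hv; omega
      exact ih h1 hkl (by omega)
  | case4 lo hi h => omega

-- B's loop: no solution in [k, bound) ⇒ none
theorem k2kScan_none (m k bound : Int)
    (hno : ∀ j, k ≤ j → j < bound → j * 2 ^ j.toNat ≠ m) :
    k2kScan m k bound = none := by
  fun_induction k2kScan m k bound with
  | case1 k h val heq =>
      have : k * 2 ^ k.toNat = m := by rw [← k2k_shift]; exact heq
      exact absurd this (hno k le_rfl h)
  | case2 => rfl
  | case3 k h val hne hgt ih =>
      exact ih (fun j hj1 hj2 => hno j (by omega) hj2)
  | case4 => rfl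

-- B's loop: solution k0 in [k, bound) with 1 ≤ k ⇒ finds it
theorem k2kScan_some (m k bound k0 : Int) (h1 : 1 ≤ k)
    (hkl : k ≤ k0) (hkh : k0 < bound) (hsol : k0 * 2 ^ k0.toNat = m) :
    k2kScan m k bound = some k0 := by
  fun_induction k2kScan m k bound with
  | case1 k h val heq =>
      have hv : k * 2 ^ k.toNat = m := by rw [← k2k_shift]; exact heq
      have : k = k0 := k2k_inj h1 (by omega) (hv.trans hsol.symm)
      simp [this]
  | case2 k h val hne hgt =>
      have hv : val = k * 2 ^ k.toNat := (k2k_shift k).symm ▸ rfl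
      have hkk0 : k < k0 := by
        rcases lt_or_eq_of_le hkl with hlt | he
        · exact hlt
        · subst he; omega
      have := k2k_mono h1 hkk0
      omega
  | case3 k h val hne hgt ih =>
      have hv : val = k * 2 ^ k.toNat := (k2k_shift k).symm ▸ rfl
      have hkk0 : k < k0 := by
        rcases lt_or_eq_of_le hkl with hlt | he
        · exact hlt
        · subst he; omega
      exact ih (by omega) (by omega)
  | case4 k h => omega

-- any solution fits under bit_length m
theorem sol_lt_bitLength {m k : Int} (hm : 0 < m) (hk : 1 ≤ k)
    (hsol : k * 2 ^ k.toNat = m) : k < (PySem.Int.bitLength m : Int) := by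
  have hlt := PySem.Int.lt_two_pow_bitLength m
  have hnat : m.natAbs = m.toNat := by omega
  have hpow : (2:Int) ^ k.toNat ≤ m := by
    calc (2:Int) ^ k.toNat = 1 * 2 ^ k.toNat := by ring
    _ ≤ k * 2 ^ k.toNat := by
        apply mul_le_mul_of_nonneg_right hk (by positivity)
    _ = m := hsol
  have h2 : (2:Int) ^ k.toNat < 2 ^ PySem.Int.bitLength m := by
    calc (2:Int) ^ k.toNat ≤ m := hpow
    _ = (m.natAbs : Int) := by omega
    _ < ((2 ^ PySem.Int.bitLength m : Nat) : Int) := by exact_mod_cast hlt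
    _ = (2:Int) ^ PySem.Int.bitLength m := by push_cast; ring
  have hklt : k.toNat < PySem.Int.bitLength m := by
    by_contra hc
    have : (2:Int) ^ PySem.Int.bitLength m ≤ 2 ^ k.toNat :=
      pow_le_pow_right₀ (by norm_num) (by omega)
    omega
  omega

-- ===== VERDICT (by name: the statement is the Claim_ definition above) =====
theorem k2k_equals_py_spec : Claim_equal_k2k_equals_py := by
  intro m _
  unfold Spec_k2k_equals_py k2k_equals_py k2k_equals_py_alt
  by_cases hm : m ≤ 0
  · simp [hm]
  · simp only [hm, if_false]
    by_cases hsol : ∃ k : Int, 1 ≤ k ∧ k * 2 ^ k.toNat = m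
    · obtain ⟨k0, hk0, hk0sol⟩ := hsol
      have hbl := sol_lt_bitLength (by omega) hk0 hk0sol
      rw [k2kSearch_some m 1 _ k0 le_rfl hk0 (by omega) hk0sol,
          k2kScan_some m 1 _ k0 le_rfl hk0 (by omega) hk0sol]
    · rw [k2kSearch_none m 1 _ (fun k hk1 _ hEq => hsol ⟨k, hk1, hEq⟩),
          k2kScan_none m 1 _ (fun k hk1 _ hEq => hsol ⟨k, hk1, hEq⟩)]
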